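-- pv_equiv track=rewrite | github.com/grahamjantz/daily-byte | vacuum/vacuum.py | vacuum
-- ===== SOURCE A (Python) =====
-- def vacuum (input):
--     arr = [0,0]
--     inputArr = list(input)
--
--     for i in inputArr:
--         if i == "L":
--             arr[1] -= 1
--         elif i == "R":
--             arr[1] += 1
--         elif i == "D":
--             arr[0] -= 1
--         elif i == "U":
--             arr[0] += 1
--         else:
--             return
--
--     if arr[0] == 0 and arr[1] == 0:
--         return True
--     else:
--         return False
-- ===== SOURCE B (Python) =====
-- def vacuum(input):
--     if not set(input) <= set("LRDU"):
--         return
--     return input.count("L") == input.count("R") and input.count("D") == input.count("U")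
-- ===== Notes on version B (the rewrite author's own statement) =====
-- stated objective: idiomatic
-- what changed: Replaces the incremental displacement loop with a branch ladder by a whole-string validity check (set inclusion) plus a tally-and-compare of the four direction counts.
import Mathlib
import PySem

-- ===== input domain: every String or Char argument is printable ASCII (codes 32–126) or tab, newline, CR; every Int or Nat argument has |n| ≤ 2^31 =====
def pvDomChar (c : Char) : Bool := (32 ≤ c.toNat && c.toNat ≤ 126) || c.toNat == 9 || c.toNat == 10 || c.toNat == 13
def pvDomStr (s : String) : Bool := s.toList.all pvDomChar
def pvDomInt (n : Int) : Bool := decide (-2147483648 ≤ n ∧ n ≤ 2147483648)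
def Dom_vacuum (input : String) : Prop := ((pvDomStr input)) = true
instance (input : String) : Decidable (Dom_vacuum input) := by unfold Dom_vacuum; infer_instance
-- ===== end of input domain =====

-- B replaces A's incremental displacement loop and branch ladder by a set-inclusion validity check plus a tally-and-compare of the four direction counts (idiomatic).

-- ===== PORT A =====
-- the for-loop over list(input), carrying arr = [a0, a1]; the bare `return` on an invalid char is none
def vacuumLoop : List Char → Int → Int → Option Bool
  | [], a0, a1 => if a0 = 0 ∧ a1 = 0 then some true else some false
  | i :: rest, a0, a1 =>
      if i = 'L' then vacuumLoop rest a0 (a1 - 1)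
      else if i = 'R' then vacuumLoop rest a0 (a1 + 1)
      else if i = 'D' then vacuumLoop rest (a0 - 1) a1
      else if i = 'U' then vacuumLoop rest (a0 + 1) a1
      else none

def vacuum (input : String) : Option Bool := vacuumLoop input.toList 0 0

-- ===== PORT B =====
-- `if not set(input) <= set("LRDU"): return` then the count comparison; str.count is PySem.Str.count
def vacuum_alt (input : String) : Option Bool :=
  if ¬ PySem.Set.issubset (PySem.Set.ofList input.toList) (PySem.Set.ofList "LRDU".toList) then none
  else some (decide (PySem.Str.count input "L" = PySem.Str.count input "R"
                     ∧ PySem.Str.count input "D" = PySem.Str.count input "U"))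

-- ===== PRECONDITION & SPEC =====
def Spec_vacuum (input : String) (out : Option Bool) : Prop := out = vacuum_alt input
instance (input : String) (out : Option Bool) : Decidable (Spec_vacuum input out) := by unfold Spec_vacuum; infer_instance

-- ===== CLAIM (what is proved, stated in full; the proofs are below) =====
def Claim_equal_vacuum : Prop := ∀ (input : String), Dom_vacuum input → Spec_vacuum input (vacuum input)

-- ===== LEMMAS AND PROOFS =====

-- A's loop computes: none iff some char is invalid, else the two net displacements compared with 0
theorem vacuumLoop_char :
    ∀ (cs : List Char) (a0 a1 : Int), vacuumLoop cs a0 a1 =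
      if cs.all (fun c => c = 'L' ∨ c = 'R' ∨ c = 'D' ∨ c = 'U') then
        some (decide (a0 + ((cs.count 'U' : Int) - (cs.count 'D' : Int)) = 0
                      ∧ a1 + ((cs.count 'R' : Int) - (cs.count 'L' : Int)) = 0))
      else none := by
  intro cs
  induction cs with
  | nil =>
      intro a0 a1
      simp only [vacuumLoop, List.all_nil, if_true, List.count_nil]
      by_cases h : a0 = 0 ∧ a1 = 0 <;> simp [h]
  | cons c rest ih =>
      intro a0 a1
      simp only [vacuumLoop]
      by_cases hall : rest.all (fun c => c = 'L' ∨ c = 'R' ∨ c = 'D' ∨ c = 'U')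
      · by_cases hL : c = 'L'
        · subst hL
          rw [if_pos rfl, ih, if_pos hall, if_pos (by rw [List.all_cons, hall, Bool.and_true]; decide)]
          congr 1; rw [decide_eq_decide]
          simp; omega
        · by_cases hR : c = 'R'
          · subst hR
            rw [if_neg hL, if_pos rfl, ih, if_pos hall, if_pos (by rw [List.all_cons, hall, Bool.and_true]; decide)]
            congr 1; rw [decide_eq_decide]
            simp; omega
          · by_cases hD : c = 'D'
            · subst hD
              rw [if_neg hL, if_neg hR, if_pos rfl, ih, if_pos hall, if_pos (by rw [List.all_cons, hall, Bool.and_true]; decide)]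
              congr 1; rw [decide_eq_decide]
              simp; omega
            · by_cases hU : c = 'U'
              · subst hU
                rw [if_neg hL, if_neg hR, if_neg hD, if_pos rfl, ih, if_pos hall,
                  if_pos (by rw [List.all_cons, hall, Bool.and_true]; decide)]
                congr 1; rw [decide_eq_decide]
                simp; omega
              · rw [if_neg hL, if_neg hR, if_neg hD, if_neg hU,
                  if_neg (by simp [hL, hR, hD, hU])]
      · by_cases hL : c = 'L'
        · subst hL; rw [if_pos rfl, ih, if_neg hall, if_neg (by rw [List.all_cons, Bool.eq_false_iff.mpr hall, Bool.and_false]; simp)]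
        · by_cases hR : c = 'R'
          · subst hR; rw [if_neg hL, if_pos rfl, ih, if_neg hall, if_neg (by rw [List.all_cons, Bool.eq_false_iff.mpr hall, Bool.and_false]; simp)]
          · by_cases hD : c = 'D'
            · subst hD
              rw [if_neg hL, if_neg hR, if_pos rfl, ih, if_neg hall, if_neg (by rw [List.all_cons, Bool.eq_false_iff.mpr hall, Bool.and_false]; simp)]
            · by_cases hU : c = 'U'
              · subst hU
                rw [if_neg hL, if_neg hR, if_neg hD, if_pos rfl, ih, if_neg hall,
                  if_neg (by rw [List.all_cons, Bool.eq_false_iff.mpr hall, Bool.and_false]; simp)]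
              · rw [if_neg hL, if_neg hR, if_neg hD, if_neg hU,
                  if_neg (by simp [hL, hR, hD, hU])]

-- the two ports' validity conditions agree
theorem valid_iff (cs : List Char) :
    PySem.Set.issubset (PySem.Set.ofList cs) (PySem.Set.ofList "LRDU".toList) =
      cs.all (fun c => c = 'L' ∨ c = 'R' ∨ c = 'D' ∨ c = 'U') := by
  apply Bool.eq_iff_iff.mpr
  rw [PySem.Set.issubset_iff]
  simp only [List.all_eq_true]
  constructor
  · intro h c hc
    have := h c ((PySem.Set.mem_ofList cs c).mpr hc)
    revert this; simp [PySem.Set.mem_ofList]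
  · intro h c hc
    have := h c ((PySem.Set.mem_ofList cs c).mp hc)
    revert this; simp [PySem.Set.mem_ofList]

theorem go_singleton (c : Char) : ∀ (l : List Char) (fuel acc : Nat), l.length ≤ fuel →
    PySem.Chars.count.go [c] fuel l acc = acc + l.count c := by
  intro l
  induction l with
  | nil => intro fuel acc _; cases fuel <;> simp [PySem.Chars.count.go]
  | cons h t ih =>
      intro fuel acc hf
      cases fuel with
      | zero => simp at hf
      | succ f =>
          rw [PySem.Chars.count.go]
          by_cases hc : h = c
          · subst hc
            simp only [List.isPrefixOf, BEq.rfl, Bool.true_and, List.length_singleton,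
              List.drop_succ_cons, List.drop_zero, if_pos]
            rw [ih f (acc + 1) (by simpa using Nat.le_of_succ_le_succ hf)]
            simp; omega
          · have hpre : ([c].isPrefixOf (h :: t)) = false := by
              simp [List.isPrefixOf]; exact fun hh => hc hh.symm
            rw [hpre, if_neg (by simp)]
            rw [ih f acc (by simpa using Nat.le_of_succ_le_succ hf)]
            simp [hc]

-- str.count with a single-character needle is the character count
theorem count_single (s : String) (c : Char) :
    PySem.Str.count s (String.ofList [c]) = s.toList.count c := by
  rw [PySem.Str.count_eq]
  have : (String.ofList [c]).toList = [c] := by simp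
  rw [this, PySem.Chars.count]
  simp only [List.isEmpty_cons, if_neg Bool.false_ne_true]
  simpa using go_singleton c s.toList s.toList.length 0 le_rfl

-- ===== VERDICT (by name: the statement is the Claim_ definition above) =====
theorem vacuum_spec : Claim_equal_vacuum := by
  intro input _
  unfold Spec_vacuum vacuum vacuum_alt
  rw [vacuumLoop_char]
  by_cases hall : input.toList.all (fun c => c = 'L' ∨ c = 'R' ∨ c = 'D' ∨ c = 'U')
  · rw [if_pos hall, if_neg (by rw [valid_iff, hall]; simp)]
    have hL : ("L" : String) = String.ofList ['L'] := rfl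
    have hR : ("R" : String) = String.ofList ['R'] := rfl
    have hD : ("D" : String) = String.ofList ['D'] := rfl
    have hU : ("U" : String) = String.ofList ['U'] := rfl
    rw [hL, hR, hD, hU, count_single, count_single, count_single, count_single]
    congr 1; rw [decide_eq_decide]; omega
  · rw [if_neg hall, if_pos (by rw [valid_iff]; simpa using hall)]
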